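-- pv_equiv track=rewrite | github.com/bangbangbang12315/Dialogue-Utils | gen_vocab.py | get_data_vocab
-- ===== SOURCE A (Python) =====
-- def get_data_vocab(data, vocab_num=40000):
--     # <unk> <s> </s> first
--     # format data/src_vocab_file
--     vocab_dic = {}
--     for text in data:
--         words = text.split(' ')
--         for w in words:
--             if not w: continue
--             vocab_dic[w] = vocab_dic.get(w, 0) + 1
--     vocab = [k for k, _ in sorted(vocab_dic.items(), key=lambda x: -x[1])]
--     vocab = ['<unk>', '<s>', '</s>'] + vocab[:vocab_num - 3]
--     return vocab
-- ===== SOURCE B (Python) =====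
-- def get_data_vocab(data, vocab_num=40000):
--     # counting (bucket) sort by frequency instead of built-in sorted:
--     # buckets filled in dict insertion order, emptied from highest count down,
--     # which reproduces the stable descending sort exactly.
--     vocab_dic = {}
--     for text in data:
--         for w in text.split(' '):
--             if not w:
--                 continue
--             vocab_dic[w] = vocab_dic.get(w, 0) + 1
--     max_c = 0
--     for c in vocab_dic.values():
--         if c > max_c:
--             max_c = c
--     buckets = [[] for _ in range(max_c + 1)]
--     for w, c in vocab_dic.items():
--         buckets[c].append(w)
--     out = []
--     for c in range(max_c, 0, -1):
--         out.extend(buckets[c])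
--     return ['<unk>', '<s>', '</s>'] + out[:vocab_num - 3]
-- ===== Notes on version B (the rewrite author's own statement) =====
-- stated objective: alternative
-- what changed: Replaces the comparison sort of dict items by key -count with a counting (bucket) sort: words are dropped into per-frequency buckets in dict insertion order and the buckets are emptied from the highest count down, reproducing the stable descending order in O(n + max_count).
import Mathlib
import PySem

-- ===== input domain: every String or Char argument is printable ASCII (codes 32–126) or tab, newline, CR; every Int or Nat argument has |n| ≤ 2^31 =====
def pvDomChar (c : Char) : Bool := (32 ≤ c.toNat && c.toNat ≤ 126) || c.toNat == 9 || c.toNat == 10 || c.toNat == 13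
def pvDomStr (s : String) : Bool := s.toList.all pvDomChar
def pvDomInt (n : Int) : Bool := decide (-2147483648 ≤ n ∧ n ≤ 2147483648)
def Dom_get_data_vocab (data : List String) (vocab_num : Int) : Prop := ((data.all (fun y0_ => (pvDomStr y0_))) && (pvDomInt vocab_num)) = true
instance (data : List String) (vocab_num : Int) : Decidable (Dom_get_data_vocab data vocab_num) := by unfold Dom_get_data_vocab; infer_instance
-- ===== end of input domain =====

-- B replaces the built-in stable sort by key -count with a counting (bucket) sort over
-- per-frequency buckets, emptied from the highest count down (alternative algorithm, same result).

-- ===== PORT A =====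
def get_data_vocab (data : List String) (vocab_num : Int) : List String :=
  let vocab_dic : PySem.Dict String Int := data.foldl (fun vocab_dic text =>
    let words := (PySem.Str.split? text " ").getD []    -- sep " " ≠ "": split? is always some
    words.foldl (fun vocab_dic w =>
      if w = "" then vocab_dic
      else vocab_dic.insert w (vocab_dic.getD w 0 + 1)) vocab_dic) PySem.Dict.empty
  let vocab := (PySem.List.sorted vocab_dic.items (fun x => -x.2)).map (fun p => p.1)
  ["<unk>", "<s>", "</s>"] ++ PySem.List.slice vocab none (some (vocab_num - 3))

-- ===== PORT B =====
def get_data_vocab_alt (data : List String) (vocab_num : Int) : List String :=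
  let vocab_dic : PySem.Dict String Int := data.foldl (fun vocab_dic text =>
    ((PySem.Str.split? text " ").getD []).foldl (fun vocab_dic w =>
      if w = "" then vocab_dic
      else vocab_dic.insert w (vocab_dic.getD w 0 + 1)) vocab_dic) PySem.Dict.empty
  let max_c : Int := vocab_dic.values.foldl (fun max_c c => if c > max_c then c else max_c) 0
  -- buckets[c].append(w): in-range update of the bucket list
  let buckets : List (List String) := vocab_dic.items.foldl
    (fun buckets p => buckets.set p.2.toNat (buckets.getD p.2.toNat [] ++ [p.1]))
    (List.replicate (max_c.toNat + 1) [])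
  let out := (PySem.List.pyRange max_c 0 (-1)).foldl (fun out c => out ++ buckets.getD c.toNat []) []
  ["<unk>", "<s>", "</s>"] ++ PySem.List.slice out none (some (vocab_num - 3))

-- ===== PRECONDITION & SPEC =====
def Spec_get_data_vocab (data : List String) (vocab_num : Int) (out : List String) : Prop := out = get_data_vocab_alt data vocab_num
instance (data : List String) (vocab_num : Int) (out : List String) : Decidable (Spec_get_data_vocab data vocab_num out) := by unfold Spec_get_data_vocab; infer_instance

-- ===== CLAIM (what is proved, stated in full; the proofs are below) =====
def Claim_equal_get_data_vocab : Prop := ∀ (data : List String) (vocab_num : Int), Dom_get_data_vocab data vocab_num → Spec_get_data_vocab data vocab_num (get_data_vocab data vocab_num)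

-- ===== LEMMAS AND PROOFS =====

-- descending list [n, n-1, …, 1] of Ints, the induction-friendly form of range(n, 0, -1)
def descInts : Nat → List Int
  | 0 => []
  | n+1 => ((n : Int) + 1) :: descInts n

theorem pyRange_countdown_eq_descInts (n : Nat) :
    PySem.List.pyRange (n : Int) 0 (-1) = descInts n := by
  induction n with
  | zero => rw [PySem.List.pyRange_neg_one_eq_nil (by norm_num)]; rfl
  | succ n ih =>
      rw [PySem.List.pyRange_neg_one_cons (by exact_mod_cast Nat.succ_pos n)]
      simp [descInts, ih]

theorem mem_descInts {n : Nat} {x : Int} : x ∈ descInts n → 1 ≤ x ∧ x ≤ (n : Int) := by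
  induction n with
  | zero => simp [descInts]
  | succ n ih =>
      intro hx
      rcases (by simpa [descInts] using hx : x = (n : Int) + 1 ∨ x ∈ descInts n) with h | h
      · constructor <;> [omega; simp [h]]
      · have := ih h; push_cast; omega

theorem descInts_split (n c : Nat) (h1 : 1 ≤ c) (h2 : c ≤ n) :
    ∃ hi, descInts n = hi ++ (c : Int) :: descInts (c - 1) ∧ ∀ x ∈ hi, (c : Int) < x := by
  induction n with
  | zero => omega
  | succ n ih =>
      by_cases hc : c = n + 1
      · refine ⟨[], ?_, by simp⟩
        subst hc
        simp [descInts]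
      · obtain ⟨hi, hhi, hlt⟩ := ih (by omega)
        refine ⟨((n : Int) + 1) :: hi, by simp [descInts, hhi], ?_⟩
        intro x hx
        rcases List.mem_cons.mp hx with h | h
        · subst h; omega
        · exact hlt x h

theorem flatMap_congr_mem {α β : Type} {cs : List α} {F G : α → List β}
    (h : ∀ c ∈ cs, F c = G c) : cs.flatMap F = cs.flatMap G := by
  induction cs with
  | nil => rfl
  | cons c cs ih =>
      simp only [List.flatMap_cons]
      rw [h c (List.mem_cons_self), ih (fun x hx => h x (List.mem_cons_of_mem _ hx))]

theorem insertBy_append {α : Type} (before : α → α → Bool) (x : α) (ys1 ys2 : List α)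
    (h1 : ∀ y ∈ ys1, before x y = false) (h2 : ∀ y ∈ ys2, before x y = true) :
    PySem.List.insertBy before x (ys1 ++ ys2) = ys1 ++ x :: ys2 := by
  induction ys1 with
  | nil =>
      cases ys2 with
      | nil => simp [PySem.List.insertBy]
      | cons y ys => simp [PySem.List.insertBy, h2 y (List.mem_cons_self)]
  | cons y ys ih =>
      have hy : before x y = false := h1 y (List.mem_cons_self)
      cases ys with
      | nil =>
          cases ys2 with
          | nil => simp [PySem.List.insertBy, hy]
          | cons z zs => simp [PySem.List.insertBy, hy, h2 z (List.mem_cons_self)]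
      | cons y' ys' =>
          have := ih (fun a ha => h1 a (List.mem_cons_of_mem _ ha))
          simpa [PySem.List.insertBy, hy] using this

-- the stable sort by -count IS the bucket concatenation from the highest count down
theorem sorted_eq_desc_buckets (l : List (String × Int)) (n : Nat)
    (hb : ∀ p ∈ l, 1 ≤ p.2 ∧ p.2 ≤ (n : Int)) :
    PySem.List.sorted l (fun x => -x.2) =
      (descInts n).flatMap (fun c => l.filter (fun p => p.2 = c)) := by
  induction l using List.reverseRecOn with
  | nil =>
      rw [PySem.List.sorted_eq_foldl_insertBy]
      simp
  | append_singleton l p ih =>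
      have hl : ∀ q ∈ l, 1 ≤ q.2 ∧ q.2 ≤ (n : Int) :=
        fun q hq => hb q (List.mem_append_left _ hq)
      have hp := hb p (List.mem_append_right _ (List.mem_singleton.mpr rfl))
      rw [PySem.List.sorted_eq_foldl_insertBy, List.foldl_append, List.foldl_cons, List.foldl_nil,
        ← PySem.List.sorted_eq_foldl_insertBy, ih hl]
      set c : Nat := p.2.toNat with hc
      have hpc : p.2 = (c : Int) := by simp [hc]; omega
      obtain ⟨hi, hsplit, hgt⟩ := descInts_split n c (by omega) (by omega)
      rw [hsplit]
      set F := fun c : Int => l.filter (fun p => p.2 = c) with hF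
      set G := fun c : Int => (l ++ [p]).filter (fun p => p.2 = c) with hG
      have hFG : ∀ c' : Int, G c' = F c' ++ (if p.2 = c' then [p] else []) := by
        intro c'
        simp [hG, hF, List.filter_append, List.filter_singleton]
      have key : List.flatMap F (hi ++ (c : Int) :: descInts (c - 1)) =
          List.flatMap F hi ++ (F (c : Int) ++ List.flatMap F (descInts (c - 1))) := by
        simp
      rw [key, ← List.append_assoc]
      rw [insertBy_append _ p (List.flatMap F hi ++ F (c : Int)) (List.flatMap F (descInts (c - 1)))]
      · -- target reassembly
        have : List.flatMap G (hi ++ (c : Int) :: descInts (c - 1)) =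
            List.flatMap G hi ++ (G (c : Int) ++ List.flatMap G (descInts (c - 1))) := by
          simp
        rw [this]
        have e1 : List.flatMap G hi = List.flatMap F hi :=
          flatMap_congr_mem (fun c' hc' => by
            rw [hFG c']; have := hgt c' hc'
            rw [if_neg (by omega)]; simp)
        have e2 : List.flatMap G (descInts (c - 1)) = List.flatMap F (descInts (c - 1)) :=
          flatMap_congr_mem (fun c' hc' => by
            rw [hFG c']; have := mem_descInts hc'
            rw [if_neg (by omega)]; simp)
        have e3 : G (c : Int) = F (c : Int) ++ [p] := by
          rw [hFG]; rw [if_pos hpc]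
        rw [e1, e2, e3]
        simp
      · -- everything before the insertion point: count ≥ c, so before = false
        intro y hy
        rcases List.mem_append.mp hy with h | h
        · obtain ⟨c', hc', hyF⟩ := List.mem_flatMap.mp h
          have hy2 : y.2 = c' := by
            have := List.of_mem_filter hyF; simpa using this
          have := hgt c' hc'
          simp only [decide_eq_false_iff_not, not_lt]
          omega
        · have hy2 : y.2 = (c : Int) := by
            have := List.of_mem_filter h; simpa using this
          simp only [decide_eq_false_iff_not, not_lt]
          omega
      · -- everything after: count < c, so before = true
        intro y hy
        obtain ⟨c', hc', hyF⟩ := List.mem_flatMap.mp hy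
        have hy2 : y.2 = c' := by
          have := List.of_mem_filter hyF; simpa using this
        have := mem_descInts hc'
        simp only [decide_eq_true_eq]
        omega

-- the bucket fold: bucket c holds, in order, the first components of the pairs with count c
theorem buckets_fold (l : List (String × Int)) (bs : List (List String))
    (h : ∀ p ∈ l, p.2.toNat < bs.length) (c : Nat) :
    (l.foldl (fun buckets p => buckets.set p.2.toNat (buckets.getD p.2.toNat [] ++ [p.1])) bs).getD c []
      = bs.getD c [] ++ (l.filter (fun p => p.2.toNat = c)).map (fun p => p.1) := by
  induction l generalizing bs with
  | nil => simp
  | cons p l ih =>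
      have hp := h p (List.mem_cons_self)
      rw [List.foldl_cons]
      rw [ih _ (by simpa using fun q hq => h q (List.mem_cons_of_mem _ hq))]
      by_cases hc : p.2.toNat = c
      · subst hc
        have hset : (bs.set p.2.toNat (bs.getD p.2.toNat [] ++ [p.1])).getD p.2.toNat []
            = bs.getD p.2.toNat [] ++ [p.1] := by
          simp [List.getD_eq_getElem?_getD, hp]
        rw [hset]
        simp
      · have hset : (bs.set p.2.toNat (bs.getD p.2.toNat [] ++ [p.1])).getD c []
            = bs.getD c [] := by
          simp [List.getD_eq_getElem?_getD, List.getElem?_set_ne (by omega : p.2.toNat ≠ c)]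
        rw [hset]
        simp [hc]

-- the running max bounds every element (and is ≥ its initial value)
theorem foldl_max_bounds (vs : List Int) (a : Int) :
    a ≤ vs.foldl (fun m c => if c > m then c else m) a ∧
      ∀ c ∈ vs, c ≤ vs.foldl (fun m c => if c > m then c else m) a := by
  induction vs generalizing a with
  | nil => simp
  | cons v vs ih =>
      obtain ⟨h1, h2⟩ := ih (if v > a then v else a)
      refine ⟨le_trans (by split_ifs <;> omega) h1, ?_⟩
      intro c hc
      rcases List.mem_cons.mp hc with h | h
      · subst h; exact le_trans (by split_ifs <;> omega) h1
      · exact h2 c h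

-- every value of the word-count dict is ≥ 1
theorem dict_build_values_pos (data : List String) :
    ∀ p ∈ (data.foldl (fun vocab_dic text =>
      ((PySem.Str.split? text " ").getD []).foldl (fun vocab_dic w =>
        if w = "" then vocab_dic
        else vocab_dic.insert w (vocab_dic.getD w 0 + 1)) vocab_dic)
      (PySem.Dict.empty : PySem.Dict String Int)).items, 1 ≤ p.2 := by
  have step : ∀ (d : PySem.Dict String Int), (∀ p ∈ d.items, 1 ≤ p.2) → ∀ (w : String),
      ∀ p ∈ ((if w = "" then d else d.insert w (d.getD w 0 + 1)) : PySem.Dict String Int).items, 1 ≤ p.2 := by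
    intro d hd w p hp
    by_cases hw : w = ""
    · rw [if_pos hw] at hp; exact hd p hp
    · rw [if_neg hw] at hp
      rcases (PySem.Dict.mem_items_insert d w (d.getD w 0 + 1) p).mp hp with h | h
      · subst h
        have : 0 ≤ d.getD w 0 := by
          rw [PySem.Dict.getD_eq_get?_getD]
          cases hg : d.get? w with
          | none => simp
          | some v =>
              have := hd (w, v) (PySem.Dict.mem_items_of_get?_eq_some d hg)
              simpa using by omega
        simpa using by omega
      · exact hd p h.1
  have inner : ∀ (ws : List String) (d : PySem.Dict String Int), (∀ p ∈ d.items, 1 ≤ p.2) →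
      ∀ p ∈ (ws.foldl (fun vocab_dic w =>
        if w = "" then vocab_dic
        else vocab_dic.insert w (vocab_dic.getD w 0 + 1)) d).items, 1 ≤ p.2 := by
    intro ws
    induction ws with
    | nil => intro d hd; simpa using hd
    | cons w ws ih =>
        intro d hd
        rw [List.foldl_cons]
        exact ih _ (step d hd w)
  induction data using List.reverseRecOn with
  | nil => simp [PySem.Dict.empty]
  | append_singleton data text ih =>
      rw [List.foldl_append, List.foldl_cons, List.foldl_nil]
      exact inner _ _ ih

theorem get_data_vocab_spec' (data : List String) (vocab_num : Int) :
    get_data_vocab data vocab_num = get_data_vocab_alt data vocab_num := by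
  simp only [get_data_vocab, get_data_vocab_alt]
  set d : PySem.Dict String Int := data.foldl (fun vocab_dic text =>
    ((PySem.Str.split? text " ").getD []).foldl (fun vocab_dic w =>
      if w = "" then vocab_dic
      else vocab_dic.insert w (vocab_dic.getD w 0 + 1)) vocab_dic) PySem.Dict.empty with hd
  have hpos : ∀ p ∈ d.items, 1 ≤ p.2 := dict_build_values_pos data
  set m : Int := d.values.foldl (fun max_c c => if c > max_c then c else max_c) 0 with hm
  have hm0 : 0 ≤ m := (foldl_max_bounds d.values 0).1
  have hub : ∀ p ∈ d.items, p.2 ≤ m := by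
    intro p hp
    refine (foldl_max_bounds d.values 0).2 p.2 ?_
    have : d.values = d.items.map (fun p => p.2) := by
      simp [PySem.Dict.values]
    rw [this]
    exact List.mem_map.mpr ⟨p, hp, rfl⟩
  set n : Nat := m.toNat with hn
  have hmn : m = (n : Int) := by omega
  suffices h : (PySem.List.sorted d.items (fun x => -x.2)).map (fun p => p.1) =
      (PySem.List.pyRange m 0 (-1)).foldl
        (fun out c => out ++ (d.items.foldl
          (fun buckets p => buckets.set p.2.toNat (buckets.getD p.2.toNat [] ++ [p.1]))
          (List.replicate (m.toNat + 1) [])).getD c.toNat []) [] by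
    rw [h]
  have hbnd : ∀ p ∈ d.items, 1 ≤ p.2 ∧ p.2 ≤ (n : Int) :=
    fun p hp => ⟨hpos p hp, by rw [← hmn]; exact hub p hp⟩
  rw [hmn, pyRange_countdown_eq_descInts n,
    PySem.List.foldl_append_eq_flatMap, List.nil_append,
    sorted_eq_desc_buckets d.items n hbnd, List.map_flatMap]
  refine flatMap_congr_mem ?_
  intro c hc
  have hcb := mem_descInts hc
  have hlen : ∀ p ∈ d.items, p.2.toNat < (List.replicate (n + 1) ([] : List String)).length := by
    intro p hp
    have := hbnd p hp
    simp; omega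
  rw [show ((n : Int).toNat = n) by omega]
  rw [buckets_fold d.items _ hlen c.toNat]
  have hrep : (List.replicate (n + 1) ([] : List String)).getD c.toNat [] = [] := by
    simp
  rw [hrep, List.nil_append]
  congr 1
  refine List.filter_congr ?_
  intro p hp
  have h1 := hbnd p hp
  simp only [decide_eq_decide]
  omega

-- ===== VERDICT (by name: the statement is the Claim_ definition above) =====
theorem get_data_vocab_spec : Claim_equal_get_data_vocab := by
  intro data vocab_num _
  unfold Spec_get_data_vocab
  exact get_data_vocab_spec' data vocab_num
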